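-- pv_equiv track=rewrite | github.com/JetBrains-Research/lca-baselines | code_completion/composers/function_class_half_mask.py | _filter_func_class
-- ===== SOURCE A (Python) =====
-- def _filter_func_class(code: str) -> str:
--     lines = code.split('\n')
--     filtered_lines = lines.copy()
--     current_mask = None
--     for idx, line in enumerate(lines):
--         if not (line.strip().startswith('def') or line.strip().startswith('class')):
--             filtered_lines[idx] = current_mask
--             if current_mask:
--                 current_mask = None
--         else:
--             current_mask = 'pass'
--     filtered_lines = [l for l in filtered_lines if l]
--     return '\n'.join(filtered_lines)
-- ===== SOURCE B (Python) =====
-- def _filter_func_class(code: str) -> str: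
--     lines = code.split('\n')
--     hdr = [l.strip().startswith(('def', 'class')) for l in lines]
--     kept = [line if hdr[i] else 'pass'
--             for i, line in enumerate(lines)
--             if hdr[i] or (i > 0 and hdr[i - 1])]
--     return '\n'.join(kept)
-- ===== Notes on version B (the rewrite author's own statement) =====
-- stated objective: simpler
-- what changed: Replaces A's two-phase mutable state machine (copy the list, overwrite non-header slots with an Optional mask that is set by headers and consumed once, then filter out falsy entries) with a single declarative comprehension: keep a line iff it is a def/class header (verbatim) or immediately follows one (as 'pass').
import Mathlib
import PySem

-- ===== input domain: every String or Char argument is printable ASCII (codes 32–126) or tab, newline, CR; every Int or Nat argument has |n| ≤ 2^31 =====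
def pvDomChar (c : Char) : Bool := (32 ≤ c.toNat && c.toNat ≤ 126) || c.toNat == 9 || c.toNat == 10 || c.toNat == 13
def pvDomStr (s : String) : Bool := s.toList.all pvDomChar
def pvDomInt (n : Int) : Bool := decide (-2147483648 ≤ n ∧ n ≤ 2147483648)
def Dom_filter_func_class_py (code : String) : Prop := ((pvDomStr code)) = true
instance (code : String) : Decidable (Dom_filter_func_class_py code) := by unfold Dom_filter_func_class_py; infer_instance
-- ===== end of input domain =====

-- B replaces A's mutable mask/None state machine + second filtering pass by one declarative
-- comprehension: a line is kept iff it is a def/class header (kept verbatim) or directly follows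
-- one (kept as 'pass'); objective: simpler.


-- ===== PORT A =====
-- line.strip().startswith('def') or line.strip().startswith('class')
def pvIsHdr (line : String) : Bool :=
  PySem.Str.startswith (PySem.Str.strip line) "def" ||
    PySem.Str.startswith (PySem.Str.strip line) "class"

-- Python truthiness of the Optional[str] `current_mask`
def pvTruthy (o : Option String) : Bool :=
  match o with
  | none => false
  | some s => decide (s ≠ "")

-- the body of A's `for idx, line in enumerate(lines):` loop, state = (filtered_lines, current_mask)
def pvStepA (st : List (Option String) × Option String) (p : Int × String) :
    List (Option String) × Option String :=
  if !(pvIsHdr p.2) then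
    (st.1.set p.1.toNat st.2, if pvTruthy st.2 then none else st.2)
  else
    (st.1, some "pass")

-- `[l for l in filtered_lines if l]` (truthiness: drops None and '')
def pvTruthyFilter (o : Option String) : Option String :=
  match o with
  | none => none
  | some l => if l = "" then none else some l

def filter_func_class_py (code : String) : String :=
  let lines := (PySem.Str.split? code "\n").getD []
  let st := (PySem.List.enumerate lines).foldl pvStepA (lines.map some, none)
  let filtered := st.1.filterMap pvTruthyFilter
  PySem.Str.join "\n" filtered

-- ===== PORT B =====
-- l.strip().startswith(('def', 'class'))
def pvIsHdrB (line : String) : Bool :=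
  let s := PySem.Str.strip line
  PySem.Str.startswith s "def" || PySem.Str.startswith s "class"

-- the comprehension's per-element choice: `line if hdr[i] else 'pass'` guarded by
-- `hdr[i] or (i > 0 and hdr[i - 1])`
def pvKeepB (hdr : List Bool) (p : Int × String) : Option String :=
  if PySem.List.pyGetD hdr p.1 false ||
      (decide (0 < p.1) && PySem.List.pyGetD hdr (p.1 - 1) false) then
    some (if PySem.List.pyGetD hdr p.1 false then p.2 else "pass")
  else
    none

def filter_func_class_py_alt (code : String) : String :=
  let lines := (PySem.Str.split? code "\n").getD []
  let hdr := lines.map pvIsHdrB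
  let kept := (PySem.List.enumerate lines).filterMap (pvKeepB hdr)
  PySem.Str.join "\n" kept

-- ===== PRECONDITION & SPEC =====
def Spec_filter_func_class_py (code : String) (out : String) : Prop := out = filter_func_class_py_alt code
instance (code : String) (out : String) : Decidable (Spec_filter_func_class_py code out) := by unfold Spec_filter_func_class_py; infer_instance

-- ===== CLAIM (what is proved, stated in full; the proofs are below) =====
def Claim_equal_filter_func_class_py : Prop := ∀ (code : String), Dom_filter_func_class_py code → Spec_filter_func_class_py code (filter_func_class_py code)

-- ===== LEMMAS AND PROOFS =====

-- A's `current_mask` as a function of whether the previous line was a header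
def pvMask (prev : Bool) : Option String := if prev then some "pass" else none

-- pointwise description of A's filtered_lines after the loop
def pvOptCore : Bool → List String → List (Option String)
  | _, [] => []
  | prev, l :: ls => (if pvIsHdr l then some l else pvMask prev) :: pvOptCore (pvIsHdr l) ls

-- the common core both programs compute before joining
def pvCore : Bool → List String → List String
  | _, [] => []
  | prev, l :: ls =>
    if pvIsHdr l then l :: pvCore true ls
    else if prev then "pass" :: pvCore false ls
    else pvCore false ls

theorem pvIsHdrB_eq (l : String) : pvIsHdrB l = pvIsHdr l := rfl

theorem pvGetDAppendLen (pre : List Bool) (b : Bool) (t : List Bool) :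
    (pre ++ b :: t).getD pre.length false = b := by
  induction pre with
  | nil => rfl
  | cons a as ih => simpa using ih

theorem pvAFold (ls : List String) : ∀ (acc : List (Option String)) (prev : Bool),
    ((PySem.List.enumerate ls (acc.length : Int)).foldl pvStepA
        (acc ++ ls.map some, pvMask prev)).1 = acc ++ pvOptCore prev ls := by
  induction ls with
  | nil => intro acc prev; simp [PySem.List.enumerate, pvOptCore]
  | cons l ls ih =>
    intro acc prev
    rw [PySem.List.enumerate_cons, List.foldl_cons]
    by_cases h : pvIsHdr l = true
    · have hstep : pvStepA (acc ++ (l :: ls).map some, pvMask prev) ((acc.length : Int), l)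
          = ((acc ++ [some l]) ++ ls.map some, pvMask true) := by
        simp [pvStepA, h, pvMask]
      rw [hstep, show ((acc.length : Int) + 1) = (((acc ++ [some l]).length : Nat) : Int) by
        simp, ih]
      simp [pvOptCore, h]
    · have hstep : pvStepA (acc ++ (l :: ls).map some, pvMask prev) ((acc.length : Int), l)
          = ((acc ++ [pvMask prev]) ++ ls.map some, pvMask false) := by
        cases prev <;> simp [pvStepA, h, pvTruthy, pvMask]
      rw [hstep, show ((acc.length : Int) + 1) = (((acc ++ [pvMask prev]).length : Nat) : Int) by
        simp, ih]
      simp [pvOptCore, h]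

theorem pvOptCoreFilter (ls : List String) : ∀ (prev : Bool),
    (pvOptCore prev ls).filterMap pvTruthyFilter = pvCore prev ls := by
  induction ls with
  | nil => intro prev; rfl
  | cons l ls ih =>
    intro prev
    rw [show pvOptCore prev (l :: ls)
        = (if pvIsHdr l then some l else pvMask prev) :: pvOptCore (pvIsHdr l) ls from rfl,
      List.filterMap_cons]
    by_cases h : pvIsHdr l = true
    · have hne : ¬ (l = "") := by
        intro he; rw [he] at h; exact absurd h (by decide)
      have hv : pvTruthyFilter (if pvIsHdr l then some l else pvMask prev) = some l := by
        simp [pvTruthyFilter, h, hne]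
      rw [hv]
      show l :: (pvOptCore (pvIsHdr l) ls).filterMap pvTruthyFilter = pvCore prev (l :: ls)
      rw [h, ih true]
      simp [pvCore, h]
    · have hf : pvIsHdr l = false := by simpa using h
      cases prev with
      | true =>
        have hv : pvTruthyFilter (if pvIsHdr l then some l else pvMask true) = some "pass" := by
          simp [pvTruthyFilter, pvMask, hf]
        rw [hv]
        show "pass" :: (pvOptCore (pvIsHdr l) ls).filterMap pvTruthyFilter
            = pvCore true (l :: ls)
        rw [hf, ih false]
        simp [pvCore, hf]
      | false =>
        have hv : pvTruthyFilter (if pvIsHdr l then some l else pvMask false) = none := by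
          simp [pvTruthyFilter, pvMask, hf]
        rw [hv]
        show (pvOptCore (pvIsHdr l) ls).filterMap pvTruthyFilter = pvCore false (l :: ls)
        rw [hf, ih false]
        simp [pvCore, hf]

theorem pvBFold (ls : List String) : ∀ (pre : List Bool) (prev : Bool),
    (pre = [] → prev = false) →
    (pre ≠ [] → pre.getD (pre.length - 1) false = prev) →
    (PySem.List.enumerate ls (pre.length : Int)).filterMap (pvKeepB (pre ++ ls.map pvIsHdrB))
      = pvCore prev ls := by
  induction ls with
  | nil => intro pre prev _ _; simp [PySem.List.enumerate, pvCore]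
  | cons l ls ih =>
    intro pre prev h0 hlast
    rw [PySem.List.enumerate_cons, List.filterMap_cons]
    have hgB : PySem.List.pyGetD (pre ++ pvIsHdrB l :: ls.map pvIsHdrB)
        ((pre.length : Nat) : Int) false = pvIsHdrB l := by
      rw [PySem.List.pyGetD_natCast, pvGetDAppendLen]
    have hrec : ∀ (prev' : Bool), prev' = pvIsHdr l →
        (PySem.List.enumerate ls ((pre.length : Int) + 1)).filterMap
          (pvKeepB (pre ++ (l :: ls).map pvIsHdrB)) = pvCore prev' ls := by
      intro prev' hp
      rw [show pre ++ (l :: ls).map pvIsHdrB = (pre ++ [pvIsHdrB l]) ++ ls.map pvIsHdrB by simp,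
        show ((pre.length : Int) + 1) = (((pre ++ [pvIsHdrB l]).length : Nat) : Int) by simp]
      refine ih (pre ++ [pvIsHdrB l]) prev' (by simp) (fun _ => ?_)
      have hl : (pre ++ [pvIsHdrB l]).length - 1 = pre.length := by simp
      rw [hl, pvGetDAppendLen, pvIsHdrB_eq, hp]
    by_cases h : pvIsHdr l = true
    · have hB : pvIsHdrB l = true := by rw [pvIsHdrB_eq]; exact h
      have hkeep : pvKeepB (pre ++ (l :: ls).map pvIsHdrB) ((pre.length : Int), l)
          = some l := by
        simp only [pvKeepB, List.map_cons, hB]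
        simp
      rw [hkeep]
      show l :: (PySem.List.enumerate ls ((pre.length : Int) + 1)).filterMap
          (pvKeepB (pre ++ (l :: ls).map pvIsHdrB)) = pvCore prev (l :: ls)
      rw [hrec true h.symm]
      simp [pvCore, h]
    · have hf : pvIsHdr l = false := by simpa using h
      have hB : pvIsHdrB l = false := by rw [pvIsHdrB_eq]; exact hf
      rcases eq_or_ne pre [] with hpre | hpre
      · have hprev : prev = false := h0 hpre
        subst hpre
        have hkeep : pvKeepB ([] ++ (l :: ls).map pvIsHdrB) (((List.length ([] : List Bool)) : Int), l)
            = none := by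
          simp only [pvKeepB, List.map_cons, List.nil_append]
          have hg0 : PySem.List.pyGetD (pvIsHdrB l :: ls.map pvIsHdrB)
              ((List.length ([] : List Bool) : Nat) : Int) false = pvIsHdrB l := by
            simpa using hgB
          rw [hg0, hB]
          simp
        rw [hkeep]
        show (PySem.List.enumerate ls (((List.length ([] : List Bool)) : Int) + 1)).filterMap
            (pvKeepB ([] ++ (l :: ls).map pvIsHdrB)) = pvCore prev (l :: ls)
        rw [hrec false hf.symm]
        simp [pvCore, hf, hprev]
      · have hlen : 0 < pre.length := List.length_pos_iff.mpr hpre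
        have hprev1 : PySem.List.pyGetD (pre ++ pvIsHdrB l :: ls.map pvIsHdrB)
            ((pre.length : Int) - 1) false = prev := by
          rw [show ((pre.length : Int) - 1) = ((pre.length - 1 : Nat) : Int) by omega,
            PySem.List.pyGetD_natCast,
            List.getD_append _ _ _ _ (by omega)]
          exact hlast hpre
        have hpos : decide ((0 : Int) < (pre.length : Int)) = true := by
          simp; omega
        have hkeep : pvKeepB (pre ++ (l :: ls).map pvIsHdrB) ((pre.length : Int), l)
            = if prev then some "pass" else none := by
          simp only [pvKeepB, List.map_cons]
          rw [hgB, hprev1, hB, hpos]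
          cases prev <;> simp
        rw [hkeep]
        cases prev with
        | true =>
          show "pass" :: (PySem.List.enumerate ls ((pre.length : Int) + 1)).filterMap
              (pvKeepB (pre ++ (l :: ls).map pvIsHdrB)) = pvCore true (l :: ls)
          rw [hrec false hf.symm]
          simp [pvCore, hf]
        | false =>
          show (PySem.List.enumerate ls ((pre.length : Int) + 1)).filterMap
              (pvKeepB (pre ++ (l :: ls).map pvIsHdrB)) = pvCore false (l :: ls)
          rw [hrec false hf.symm]
          simp [pvCore, hf]

theorem pvAList (lines : List String) :
    ((PySem.List.enumerate lines).foldl pvStepA (lines.map some, none)).1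
      = pvOptCore false lines := by
  have h := pvAFold lines [] false
  simpa [pvMask] using h

theorem pvBList (lines : List String) :
    (PySem.List.enumerate lines).filterMap (pvKeepB (lines.map pvIsHdrB))
      = pvCore false lines := by
  have h := pvBFold lines [] false (fun _ => rfl) (fun hne => absurd rfl hne)
  simpa using h

-- ===== VERDICT (by name: the statement is the Claim_ definition above) =====
theorem filter_func_class_py_spec : Claim_equal_filter_func_class_py := by
  intro code _
  unfold Spec_filter_func_class_py
  show PySem.Str.join "\n"
      ((((PySem.List.enumerate ((PySem.Str.split? code "\n").getD [])).foldl pvStepA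
          (((PySem.Str.split? code "\n").getD []).map some, none)).1).filterMap pvTruthyFilter)
    = PySem.Str.join "\n"
      ((PySem.List.enumerate ((PySem.Str.split? code "\n").getD [])).filterMap
        (pvKeepB (((PySem.Str.split? code "\n").getD []).map pvIsHdrB)))
  rw [pvAList, pvOptCoreFilter, pvBList]
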